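-- pv_equiv track=rewrite | github.com/MAInformatico/Codefights | Graphs/KingdomRoads/RoadsBuilding.py | roadsBuilding
-- ===== SOURCE A (Python) =====
-- def roadsBuilding(cities, roads):
--     cities_visited = set()
--     result = []
--
--     for i in roads:
--         x = i[0] if i[0] < i[1] else i[1]
--         y = i[1] if i[1] > i[0] else i[0]
--
--         cities_visited.add((x, y))
--
--     for city in range(cities):
--         for route in range(cities):
--             if city != route:
--                 x = city if city < route else route
--                 y = route if route > city else city
--
--                 if (x, y) not in cities_visited:
--                     cities_visited.add((x, y))
--                     result.append([x, y])
--
--     return result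
-- ===== SOURCE B (Python) =====
-- def roadsBuilding(cities, roads):
--     # Normalized, deduplicated road endpoints; keep only pairs the grid can produce.
--     pairs = {(min(r[0], r[1]), max(r[0], r[1])) for r in roads}
--     # Ascending by row-major position in the upper triangle.
--     edges = sorted((e for e in pairs if 0 <= e[0] < e[1] < cities),
--                    key=lambda e: e[0] * cities + e[1])
--     result = []
--     it = iter(edges)
--     nxt = next(it, None)
--     for i in range(cities):
--         for j in range(i + 1, cities):
--             if nxt == (i, j):
--                 nxt = next(it, None)
--             else:
--                 result.append([i, j])
--     return result
-- ===== Notes on version B (the rewrite author's own statement) =====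
-- stated objective: alternative
-- what changed: B sorts the deduplicated relevant road pairs once and then streams through the upper-triangular pair sequence with a single merge cursor (no visited set, no membership test per pair), instead of A's full n x n enumeration with a dedup-and-membership hash set.
import Mathlib
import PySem

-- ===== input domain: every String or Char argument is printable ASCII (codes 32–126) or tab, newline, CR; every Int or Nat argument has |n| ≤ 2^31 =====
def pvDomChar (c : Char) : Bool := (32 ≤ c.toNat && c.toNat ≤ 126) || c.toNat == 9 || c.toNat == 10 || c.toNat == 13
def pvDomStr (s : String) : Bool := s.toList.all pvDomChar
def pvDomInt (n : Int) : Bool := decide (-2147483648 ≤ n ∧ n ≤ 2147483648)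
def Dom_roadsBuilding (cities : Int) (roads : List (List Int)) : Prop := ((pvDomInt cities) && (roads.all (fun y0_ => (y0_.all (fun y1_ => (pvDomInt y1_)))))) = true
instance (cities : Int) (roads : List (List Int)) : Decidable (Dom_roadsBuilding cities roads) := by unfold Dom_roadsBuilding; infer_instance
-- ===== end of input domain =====

-- B sorts the deduplicated relevant road pairs once and streams the upper-triangular
-- pair sequence against them with a single merge cursor (no visited set, no per-pair
-- membership test): an alternative, merge-based algorithm.

-- ===== PORT A =====
-- x = i[0] if i[0] < i[1] else i[1]; y = i[1] if i[1] > i[0] else i[0]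
def pvNorm (a b : Int) : Int × Int := (if a < b then a else b, if b > a then b else a)

-- the body of A's inner 'for route in range(cities)' loop
def pvStepInA (city : Int) (st : PySem.Set (Int × Int) × List (List Int)) (route : Int) :
    PySem.Set (Int × Int) × List (List Int) :=
  if city ≠ route then
    let xy := pvNorm city route
    if PySem.Set.contains st.1 xy then st
    else (PySem.Set.add st.1 xy, st.2 ++ [[xy.1, xy.2]])
  else st

-- the body of A's outer 'for city in range(cities)' loop
def pvStepOutA (cities : Int) (st : PySem.Set (Int × Int) × List (List Int)) (city : Int) :
    PySem.Set (Int × Int) × List (List Int) :=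
  (PySem.List.pyRange 0 cities 1).foldl (pvStepInA city) st

-- i[0]/i[1] ported as pyGetD _ _ 0: exact whenever the road has length ≥ 2 (Pre_);
-- in Python a shorter road raises IndexError.
def roadsBuilding (cities : Int) (roads : List (List Int)) : List (List Int) :=
  let visited : PySem.Set (Int × Int) := roads.foldl
    (fun s i => PySem.Set.add s (pvNorm (PySem.List.pyGetD i 0 0) (PySem.List.pyGetD i 1 0)))
    PySem.Set.empty
  ((PySem.List.pyRange 0 cities 1).foldl (pvStepOutA cities) (visited, [])).2

-- ===== PORT B =====
-- (min(r[0], r[1]), max(r[0], r[1]))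
def pvNormRoad (r : List Int) : Int × Int :=
  (min (PySem.List.pyGetD r 0 0) (PySem.List.pyGetD r 1 0),
   max (PySem.List.pyGetD r 0 0) (PySem.List.pyGetD r 1 0))

-- key=lambda e: e[0] * cities + e[1]   (row-major position in the upper triangle)
def pvKey (cities : Int) (e : Int × Int) : Int := e.1 * cities + e.2

-- edges = sorted((e for e in pairs if 0 <= e[0] < e[1] < cities), key=...); the key is
-- injective on these pairs, so the result does not depend on the set's iteration order.
def pvEdges (cities : Int) (roads : List (List Int)) : List (Int × Int) :=
  PySem.List.sorted
    (List.filter (fun e => decide (0 ≤ e.1 ∧ e.1 < e.2 ∧ e.2 < cities))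
      (PySem.Set.ofList (roads.map pvNormRoad)))
    (pvKey cities)

-- the body of B's inner loop: state = (remaining iterator, result); nxt = st.1.head?
def pvStepInB (i : Int) (st : List (Int × Int) × List (List Int)) (j : Int) :
    List (Int × Int) × List (List Int) :=
  if st.1.head? = some (i, j) then (st.1.tail, st.2) else (st.1, st.2 ++ [[i, j]])

-- the body of B's outer 'for i in range(cities)' loop
def pvStepOutB (cities : Int) (st : List (Int × Int) × List (List Int)) (i : Int) :
    List (Int × Int) × List (List Int) :=
  (PySem.List.pyRange (i + 1) cities 1).foldl (pvStepInB i) st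

def roadsBuilding_alt (cities : Int) (roads : List (List Int)) : List (List Int) :=
  ((PySem.List.pyRange 0 cities 1).foldl (pvStepOutB cities) (pvEdges cities roads, [])).2

-- ===== PRECONDITION & SPEC =====
-- Pre_ excludes exactly the inputs where Python A raises IndexError: a road with fewer than 2 entries.
def Pre_roadsBuilding (cities : Int) (roads : List (List Int)) : Prop :=
  ∀ r ∈ roads, 2 ≤ r.length
instance (cities : Int) (roads : List (List Int)) : Decidable (Pre_roadsBuilding cities roads) := by
  unfold Pre_roadsBuilding; infer_instance

def pvWitness_roadsBuilding : Int × List (List Int) := (4, [[0, 1], [2, 0]])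

def Spec_roadsBuilding (cities : Int) (roads : List (List Int)) (out : List (List Int)) : Prop :=
  out = roadsBuilding_alt cities roads
instance (cities : Int) (roads : List (List Int)) (out : List (List Int)) :
    Decidable (Spec_roadsBuilding cities roads out) := by unfold Spec_roadsBuilding; infer_instance

-- ===== CLAIM (what is proved, stated in full; the proofs are below) =====
def Claim_equal_roadsBuilding : Prop := ∀ (cities : Int) (roads : List (List Int)),
  Dom_roadsBuilding cities roads → Pre_roadsBuilding cities roads →
  Spec_roadsBuilding cities roads (roadsBuilding cities roads)

-- ===== LEMMAS AND PROOFS =====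

lemma pvNorm_eq_min_max (a b : Int) : pvNorm a b = (min a b, max a b) := by
  unfold pvNorm
  rcases lt_trichotomy a b with h | h | h <;>
    simp [le_of_lt, h]

-- the visited set A builds from roads is Set.ofList of the normalized roads
lemma pvInit_eq (roads : List (List Int)) :
    roads.foldl
      (fun s i => PySem.Set.add s (pvNorm (PySem.List.pyGetD i 0 0) (PySem.List.pyGetD i 1 0)))
      PySem.Set.empty
    = PySem.Set.ofList (roads.map pvNormRoad) := by
  rw [PySem.Set.ofList_eq_foldl, List.foldl_map]
  simp only [pvNorm_eq_min_max, pvNormRoad, PySem.Set.empty]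

-- ===== the membership-based middle form (used only by the proofs) =====
def pvStepInM (R : PySem.Set (Int × Int)) (i : Int) (res : List (List Int)) (j : Int) :
    List (List Int) :=
  if PySem.Set.contains R (i, j) then res else res ++ [[i, j]]

def pvStepOutM (R : PySem.Set (Int × Int)) (cities : Int) (res : List (List Int)) (i : Int) :
    List (List Int) :=
  (PySem.List.pyRange (i + 1) cities 1).foldl (pvStepInM R i) res

-- invariant on A's visited set before processing city c
def pvInvA (R : List (Int × Int)) (N c : Int) (S : List (Int × Int)) : Prop :=
  ∀ p : Int × Int, p ∈ S ↔ p ∈ R ∨ (0 ≤ p.1 ∧ p.1 < p.2 ∧ p.2 < N ∧ p.1 < c)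

-- invariant inside city c's pass, before processing route j (j > c)
def pvInvA2 (R : List (Int × Int)) (N c j : Int) (S : List (Int × Int)) : Prop :=
  ∀ p : Int × Int, p ∈ S ↔ p ∈ R ∨ (0 ≤ p.1 ∧ p.1 < p.2 ∧ p.2 < N ∧ p.1 < c)
    ∨ (p.1 = c ∧ c < p.2 ∧ p.2 < j)

lemma pv_foldl_fixed_of_mem {α β : Type} (f : β → α → β) (b : β) :
    ∀ l : List α, (∀ a ∈ l, f b a = b) → l.foldl f b = b := by
  intro l
  induction l with
  | nil => intro _; rfl
  | cons x xs ih =>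
      intro h
      simp only [List.foldl_cons, h x (by simp)]
      exact ih (fun a ha => h a (by simp [ha]))

-- routes 0..c leave the state unchanged
lemma pvPhase1 (R : List (Int × Int)) (N c : Int) (hcN : c < N)
    (S : List (Int × Int)) (res : List (List Int)) (hInv : pvInvA R N c S) :
    (PySem.List.pyRange 0 (c + 1) 1).foldl (pvStepInA c) (S, res) = (S, res) := by
  apply pv_foldl_fixed_of_mem
  intro r hr
  rw [PySem.List.mem_pyRange_one] at hr
  by_cases hrc : c = r
  · simp [pvStepInA, hrc]
  · have hlt : r < c := by omega
    have hxy : pvNorm c r = (r, c) := by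
      unfold pvNorm; rw [if_neg (by omega), if_neg (by omega)]
    have hmem : (r, c) ∈ S := (hInv (r, c)).mpr (Or.inr ⟨by omega, by omega, hcN, hlt⟩)
    simp [pvStepInA, hrc, hxy, hmem]

-- routes j..N-1 (j > c): A appends exactly what the membership form appends
lemma pvPhase2 (R : List (Int × Int)) (N c : Int) (_h0 : 0 ≤ c) :
    ∀ (fuel : Nat) (j : Int) (S : List (Int × Int)) (res : List (List Int)),
      (N - j).toNat = fuel → c < j → j ≤ N → pvInvA2 R N c j S →
      ((PySem.List.pyRange j N 1).foldl (pvStepInA c) (S, res)).2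
        = (PySem.List.pyRange j N 1).foldl (pvStepInM R c) res
      ∧ pvInvA2 R N c N ((PySem.List.pyRange j N 1).foldl (pvStepInA c) (S, res)).1 := by
  intro fuel
  induction fuel with
  | zero =>
      intro j S res hf hcj hjN hInv
      have hjN' : j = N := by omega
      rw [PySem.List.pyRange_one_eq_nil (by omega : N ≤ j)]
      exact ⟨rfl, hjN' ▸ hInv⟩
  | succ fuel ih =>
      intro j S res hf hcj hjN hInv
      have hjN' : j < N := by omega
      rw [PySem.List.pyRange_one_cons hjN']
      simp only [List.foldl_cons]
      have hne : c ≠ j := by omega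
      have hxy : pvNorm c j = (c, j) := by
        unfold pvNorm; rw [if_pos hcj, if_pos hcj]
      have hmemS : (c, j) ∈ S ↔ (c, j) ∈ R := by
        rw [hInv (c, j)]
        constructor
        · rintro (h | h | h)
          · exact h
          · exact absurd h.2.2.2 (by omega)
          · exact absurd h.2.2 (by omega)
        · exact Or.inl
      by_cases hR : (c, j) ∈ R
      · have hstep : pvStepInA c (S, res) j = (S, res) := by
          simp [pvStepInA, hne, hxy, hmemS.mpr hR]
        have hstepM : pvStepInM R c res j = res := by
          simp [pvStepInM, hR]
        rw [hstep, hstepM]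
        apply ih (j + 1) S res (by omega) (by omega) (by omega)
        intro p
        rw [hInv p]
        constructor
        · rintro (h | h | h)
          · exact Or.inl h
          · exact Or.inr (Or.inl h)
          · exact Or.inr (Or.inr ⟨h.1, h.2.1, by omega⟩)
        · rintro (h | h | h)
          · exact Or.inl h
          · exact Or.inr (Or.inl h)
          · by_cases hj2 : p.2 = j
            · have : p = (c, j) := by
                rcases p with ⟨p1, p2⟩; simp_all
              rw [this]; exact Or.inl hR
            · exact Or.inr (Or.inr ⟨h.1, h.2.1, by omega⟩)
      · have hnotS : (c, j) ∉ S := fun h => hR (hmemS.mp h)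
        have hstep : pvStepInA c (S, res) j = (S ++ [(c, j)], res ++ [[c, j]]) := by
          simp [pvStepInA, hne, hxy, hnotS]
        have hstepM : pvStepInM R c res j = res ++ [[c, j]] := by
          simp [pvStepInM, hR]
        rw [hstep, hstepM]
        apply ih (j + 1) (S ++ [(c, j)]) (res ++ [[c, j]]) (by omega) (by omega) (by omega)
        intro p
        simp only [List.mem_append, List.mem_singleton, hInv p]
        constructor
        · rintro ((h | h | h) | h)
          · exact Or.inl h
          · exact Or.inr (Or.inl h)
          · exact Or.inr (Or.inr ⟨h.1, h.2.1, by omega⟩)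
          · subst h
            exact Or.inr (Or.inr ⟨rfl, hcj, by omega⟩)
        · rintro (h | h | h)
          · exact Or.inl (Or.inl h)
          · exact Or.inl (Or.inr (Or.inl h))
          · by_cases hj2 : p.2 = j
            · right
              rcases p with ⟨p1, p2⟩
              simp_all
            · exact Or.inl (Or.inr (Or.inr ⟨h.1, h.2.1, by omega⟩))

-- A's whole outer loop from city c on, given the invariant
lemma pvOuter (R : List (Int × Int)) (N : Int) :
    ∀ (fuel : Nat) (c : Int) (S : List (Int × Int)) (res : List (List Int)),
      (N - c).toNat = fuel → 0 ≤ c → pvInvA R N c S →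
      ((PySem.List.pyRange c N 1).foldl (pvStepOutA N) (S, res)).2
        = (PySem.List.pyRange c N 1).foldl (pvStepOutM R N) res := by
  intro fuel
  induction fuel with
  | zero =>
      intro c S res hf h0 hInv
      rw [PySem.List.pyRange_one_eq_nil (by omega : N ≤ c)]
      rfl
  | succ fuel ih =>
      intro c S res hf h0 hInv
      have hcN : c < N := by omega
      rw [PySem.List.pyRange_one_cons hcN]
      simp only [List.foldl_cons]
      have hsplit : PySem.List.pyRange 0 N 1
          = PySem.List.pyRange 0 (c + 1) 1 ++ PySem.List.pyRange (c + 1) N 1 :=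
        PySem.List.pyRange_one_append 0 (c + 1) N (by omega) (by omega)
      have hInv2 : pvInvA2 R N c (c + 1) S := by
        intro p
        rw [hInv p]
        constructor
        · rintro (h | h)
          · exact Or.inl h
          · exact Or.inr (Or.inl h)
        · rintro (h | h | h)
          · exact Or.inl h
          · exact Or.inr h
          · exact absurd h.2 (by omega)
      obtain ⟨h2a, h2b⟩ := pvPhase2 R N c h0 (N - (c + 1)).toNat (c + 1) S res rfl
        (by omega) (by omega) hInv2
      have hA : pvStepOutA N (S, res) c
          = (((PySem.List.pyRange (c + 1) N 1).foldl (pvStepInA c) (S, res)).1,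
             (PySem.List.pyRange (c + 1) N 1).foldl (pvStepInM R c) res) := by
        unfold pvStepOutA
        rw [hsplit, List.foldl_append, pvPhase1 R N c hcN S res hInv, ← h2a]
      rw [hA]
      have hM : (PySem.List.pyRange (c + 1) N 1).foldl (pvStepInM R c) res
          = pvStepOutM R N res c := rfl
      rw [hM]
      have hInv3 : pvInvA R N (c + 1)
          ((PySem.List.pyRange (c + 1) N 1).foldl (pvStepInA c) (S, res)).1 := by
        intro p
        rw [h2b p]
        constructor
        · rintro (h | h | h)
          · exact Or.inl h
          · exact Or.inr ⟨h.1, h.2.1, h.2.2.1, by omega⟩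
          · exact Or.inr ⟨by omega, by omega, h.2.2, by omega⟩
        · rintro (h | h)
          · exact Or.inl h
          · by_cases h1 : p.1 = c
            · exact Or.inr (Or.inr ⟨h1, by omega, h.2.2.1⟩)
            · exact Or.inr (Or.inl ⟨h.1, h.2.1, h.2.2.1, by omega⟩)
      exact ih (c + 1) _ _ (by omega) (by omega) hInv3

-- ===== the common pair stream and the merge step =====
def pvPairs (N : Int) : List (Int × Int) :=
  (PySem.List.pyRange 0 N 1).flatMap
    (fun i => (PySem.List.pyRange (i + 1) N 1).map (fun j => (i, j)))

def pvMerge (st : List (Int × Int) × List (List Int)) (p : Int × Int) :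
    List (Int × Int) × List (List Int) :=
  if st.1.head? = some p then (st.1.tail, st.2) else (st.1, st.2 ++ [[p.1, p.2]])

lemma pv_mem_pvPairs (N : Int) (p : Int × Int) :
    p ∈ pvPairs N ↔ 0 ≤ p.1 ∧ p.1 < p.2 ∧ p.2 < N := by
  rcases p with ⟨x, y⟩
  simp only [pvPairs, List.mem_flatMap, List.mem_map, PySem.List.mem_pyRange_one]
  constructor
  · rintro ⟨i, hi, j, hj, hp⟩
    rw [Prod.mk.injEq] at hp
    obtain ⟨rfl, rfl⟩ := hp
    exact ⟨hi.1, by omega, hj.2⟩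
  · rintro ⟨h1, h2, h3⟩
    exact ⟨x, ⟨h1, by omega⟩, y, ⟨by omega, h3⟩, rfl⟩

lemma pvRange_pairwise (N : Int) :
    ∀ (fuel : Nat) (a : Int), (N - a).toNat = fuel →
      (PySem.List.pyRange a N 1).Pairwise (· < ·) := by
  intro fuel
  induction fuel with
  | zero =>
      intro a hf
      rw [PySem.List.pyRange_one_eq_nil (by omega : N ≤ a)]
      exact List.Pairwise.nil
  | succ fuel ih =>
      intro a hf
      have haN : a < N := by omega
      rw [PySem.List.pyRange_one_cons haN]
      refine List.Pairwise.cons ?_ (ih (a + 1) (by omega))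
      intro b hb
      rw [PySem.List.mem_pyRange_one] at hb
      omega

lemma pvPairs_pairwise (N : Int) :
    (pvPairs N).Pairwise (fun a b => pvKey N a < pvKey N b) := by
  rw [pvPairs, List.flatMap_def, List.pairwise_flatten]
  constructor
  · intro l hl
    rw [List.mem_map] at hl
    obtain ⟨i, _, rfl⟩ := hl
    rw [List.pairwise_map]
    refine (pvRange_pairwise N (N - (i + 1)).toNat (i + 1) rfl).imp ?_
    intro a b hab
    simp only [pvKey]
    omega
  · rw [List.pairwise_map]
    refine List.Pairwise.imp_of_mem ?_ (pvRange_pairwise N (N - 0).toNat 0 rfl)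
    intro i i' hi hi' hii' x hx y hy
    rw [PySem.List.mem_pyRange_one] at hi hi'
    rw [List.mem_map] at hx hy
    obtain ⟨j, hj, rfl⟩ := hx
    obtain ⟨j', hj', rfl⟩ := hy
    rw [PySem.List.mem_pyRange_one] at hj hj'
    simp only [pvKey]
    -- i*N + j < i'*N + j'  from  0 ≤ i < i', i+1 ≤ j < N, i'+1 ≤ j' < N
    have hiN : (i + 1) * N ≤ i' * N := by
      apply mul_le_mul_of_nonneg_right (by omega)
      omega
    nlinarith [hi.1, hi'.1, hj.1, hj.2, hj'.1, hj'.2]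

lemma pvPairs_nodup (N : Int) : (pvPairs N).Nodup := by
  refine (pvPairs_pairwise N).imp ?_
  intro a b hab heq
  rw [heq] at hab
  exact lt_irrefl _ hab

-- the merge fold over ps, seeded with ps.filter q, emits exactly the non-q elements
lemma pvMergeFilter (q : Int × Int → Bool) :
    ∀ (ps : List (Int × Int)) (res : List (List Int)), ps.Nodup →
      (ps.foldl pvMerge (ps.filter q, res)).2
        = res ++ (ps.filter (fun p => !q p)).map (fun p => [p.1, p.2]) := by
  intro ps
  induction ps with
  | nil => intro res _; simp
  | cons p ps' ih =>
      intro res hnd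
      have hpn : p ∉ ps' := (List.nodup_cons.mp hnd).1
      have hnd' : ps'.Nodup := (List.nodup_cons.mp hnd).2
      by_cases hq : q p = true
      · rw [List.filter_cons_of_pos hq, List.filter_cons_of_neg (by simp [hq]),
          List.foldl_cons]
        have hstep : pvMerge (p :: ps'.filter q, res) p = (ps'.filter q, res) := by
          simp [pvMerge]
        rw [hstep, ih res hnd']
      · have hhead : ¬ ((ps'.filter q).head? = some p) := by
          cases hfq : ps'.filter q with
          | nil => simp
          | cons x t =>
              simp only [List.head?_cons, Option.some.injEq]
              intro hxp
              apply hpn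
              apply List.mem_of_mem_filter (p := q)
              rw [hfq, ← hxp]
              exact List.mem_cons_self
        rw [List.filter_cons_of_neg hq, List.filter_cons_of_pos (by simp [hq]),
          List.foldl_cons]
        have hstep : pvMerge (ps'.filter q, res) p = (ps'.filter q, res ++ [[p.1, p.2]]) := by
          simp only [pvMerge]
          rw [if_neg hhead]
        rw [hstep, ih (res ++ [[p.1, p.2]]) hnd']
        simp

-- B's nested loops are the merge fold over the pair stream
lemma pvB_flatten (N : Int) (st : List (Int × Int) × List (List Int)) :
    (PySem.List.pyRange 0 N 1).foldl (pvStepOutB N) st = (pvPairs N).foldl pvMerge st := by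
  rw [pvPairs, List.foldl_flatMap]
  apply PySem.List.foldl_congr_mem
  intro acc i _
  rw [List.foldl_map]
  rfl

-- the middle form is the filtered-map over the pair stream
lemma pvM_flatten (R : PySem.Set (Int × Int)) (N : Int) :
    (PySem.List.pyRange 0 N 1).foldl (pvStepOutM R N) []
      = ((pvPairs N).filter (fun p => !PySem.Set.contains R p)).map (fun p => [p.1, p.2]) := by
  have hin : ∀ (res : List (List Int)) (i : Int),
      pvStepOutM R N res i
        = res ++ ((PySem.List.pyRange (i + 1) N 1).filter
            (fun j => !PySem.Set.contains R (i, j))).map (fun j => [i, j]) := by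
    intro res i
    unfold pvStepOutM
    rw [PySem.List.foldl_congr_mem (PySem.List.pyRange (i + 1) N 1) (pvStepInM R i)
      (fun acc j => if (!PySem.Set.contains R (i, j)) = true then acc ++ [[i, j]] else acc) res
      (by
        intro acc j _
        unfold pvStepInM
        cases h : PySem.Set.contains R (i, j) <;> simp only [h] <;> simp)]
    exact PySem.List.foldl_append_if _ _ _ _
  rw [PySem.List.foldl_congr_mem (PySem.List.pyRange 0 N 1) (pvStepOutM R N)
      (fun res i => res ++ ((PySem.List.pyRange (i + 1) N 1).filter
        (fun j => !PySem.Set.contains R (i, j))).map (fun j => [i, j])) []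
      (fun acc i _ => hin acc i)]
  rw [PySem.List.foldl_append_eq_flatMap, pvPairs, List.filter_flatMap, List.map_flatMap]
  simp only [List.nil_append]
  refine List.flatMap_congr ?_
  intro i _
  rw [List.filter_map, List.map_map]
  rfl

-- edges is exactly the pair stream filtered by membership in the normalized road set
lemma pvEdges_eq (cities : Int) (roads : List (List Int)) :
    pvEdges cities roads
      = (pvPairs cities).filter
          (fun p => PySem.Set.contains (PySem.Set.ofList (roads.map pvNormRoad)) p) := by
  apply PySem.List.sorted_eq_of_perm_of_pairwise_lt
  · -- permutation: both are nodup with the same membership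
    apply (List.perm_ext_iff_of_nodup ?_ ?_).mpr
    · intro p
      simp only [List.mem_filter, PySem.Set.contains_iff, PySem.Set.mem_ofList,
        pv_mem_pvPairs, decide_eq_true_eq]
      tauto
    · exact (pvPairs_nodup cities).filter _
    · exact (PySem.Set.nodup_ofList _).filter _
  · exact (pvPairs_pairwise cities).filter _

-- ===== VERDICT (by name: the statement is the Claim_ definition above) =====
theorem roadsBuilding_spec : Claim_equal_roadsBuilding := by
  intro cities roads _ _
  unfold Spec_roadsBuilding
  simp only [roadsBuilding, roadsBuilding_alt]
  rw [pvInit_eq]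
  set R : PySem.Set (Int × Int) := PySem.Set.ofList (roads.map pvNormRoad) with hR
  have hA : ((PySem.List.pyRange 0 cities 1).foldl (pvStepOutA cities) (R, [])).2
      = (PySem.List.pyRange 0 cities 1).foldl (pvStepOutM R cities) [] := by
    apply pvOuter R cities (cities - 0).toNat 0 R [] rfl (le_refl 0)
    intro p
    constructor
    · exact Or.inl
    · rintro (h | h)
      · exact h
      · exact absurd h.2.2.2 (by omega)
  rw [hA, pvM_flatten]
  rw [pvB_flatten, pvEdges_eq, ← hR]
  rw [pvMergeFilter (fun p => PySem.Set.contains R p) (pvPairs cities) [] (pvPairs_nodup cities)]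
  simp
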